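-- pv_equiv track=rewrite | github.com/burning-calamity/extirpation | online/amsco_transposition.py | amsco_decrypt
-- ===== SOURCE A (Python) =====
-- def _key_order(key: str) -> list[int]:
--     return sorted(range(len(key)), key=lambda i: (key[i], i))
--
-- def _cell_lengths(text_len: int, cols: int) -> list[list[int]]:
--     lengths: list[list[int]] = []
--     used = 0
--     row_start_two = False
--     while used < text_len:
--         row: list[int] = []
--         take_two = row_start_two
--         for _ in range(cols):
--             if used >= text_len:
--                 break
--             ln = 2 if take_two else 1
--             ln = min(ln, text_len - used)
--             row.append(ln)
--             used += ln
--             take_two = not take_two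
--         lengths.append(row)
--         row_start_two = not row_start_two
--     return lengths
--
-- def amsco_decrypt(ciphertext: str, key: str) -> str:
--     """Decrypt text produced by ``amsco_encrypt``."""
--     if not key:
--         raise ValueError('key must not be empty')
--
--     cols = len(key)
--     lengths = _cell_lengths(len(ciphertext), cols)
--     grid: list[list[str]] = [['' for _ in row] for row in lengths]
--
--     idx = 0
--     for c in _key_order(key):
--         for r, row in enumerate(lengths):
--             if c < len(row):
--                 ln = row[c]
--                 grid[r][c] = ciphertext[idx:idx + ln]
--                 idx += ln
--
--     out: list[str] = []
--     for r, row in enumerate(lengths):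
--         for c in range(len(row)):
--             out.append(grid[r][c])
--     return ''.join(out)
-- ===== SOURCE B (Python) =====
-- def _key_order(key: str) -> list[int]:
--     return sorted(range(len(key)), key=lambda i: (key[i], i))
--
-- def _cell_lengths(text_len: int, cols: int) -> list[list[int]]:
--     lengths: list[list[int]] = []
--     used = 0
--     row_start_two = False
--     while used < text_len:
--         row: list[int] = []
--         take_two = row_start_two
--         for _ in range(cols):
--             if used >= text_len:
--                 break
--             ln = 2 if take_two else 1
--             ln = min(ln, text_len - used)
--             row.append(ln)
--             used += ln
--             take_two = not take_two
--         lengths.append(row)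
--         row_start_two = not row_start_two
--     return lengths
--
-- def amsco_decrypt(ciphertext: str, key: str) -> str:
--     """Decrypt text produced by ``amsco_encrypt``."""
--     if not key:
--         raise ValueError('key must not be empty')
--
--     cols = len(key)
--     lengths = _cell_lengths(len(ciphertext), cols)
--
--     # total number of ciphertext characters belonging to each column
--     col_total = [0] * cols
--     for row in lengths:
--         for c, ln in enumerate(row):
--             col_total[c] += ln
--
--     # carve the ciphertext: each column (in key order) owns one contiguous
--     # slice; cursor[c] is where column c's next unread character sits
--     cursor = [0] * cols
--     pos = 0
--     for c in _key_order(key):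
--         cursor[c] = pos
--         pos += col_total[c]
--
--     # read out row-major, consuming row[c] characters from column c each time
--     parts: list[str] = []
--     for row in lengths:
--         for c, ln in enumerate(row):
--             parts.append(ciphertext[cursor[c]:cursor[c] + ln])
--             cursor[c] += ln
--     return ''.join(parts)
-- ===== Notes on version B (the rewrite author's own statement) =====
-- stated objective: alternative
-- what changed: B replaces A's cell-by-cell 2D grid fill (and the grid itself) by computing per-column totals, carving the ciphertext into one contiguous slice per column in key order via start offsets, and emitting the plaintext in a single row-major pass that consumes from per-column read cursors.
import Mathlib
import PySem

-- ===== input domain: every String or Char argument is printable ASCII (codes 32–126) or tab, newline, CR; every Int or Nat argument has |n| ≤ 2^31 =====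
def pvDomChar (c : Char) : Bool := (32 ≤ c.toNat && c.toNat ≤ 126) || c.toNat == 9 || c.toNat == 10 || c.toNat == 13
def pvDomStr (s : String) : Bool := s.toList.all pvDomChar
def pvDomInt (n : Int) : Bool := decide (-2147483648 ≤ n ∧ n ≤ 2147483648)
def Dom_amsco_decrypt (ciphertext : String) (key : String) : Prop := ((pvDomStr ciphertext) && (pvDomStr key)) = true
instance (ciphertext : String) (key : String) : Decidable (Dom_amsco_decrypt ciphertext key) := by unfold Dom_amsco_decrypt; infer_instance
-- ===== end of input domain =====

-- B replaces A's cell-by-cell 2D grid fill by a per-column carve of the ciphertext (start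
-- offsets in key order) plus one row-major readout with per-column cursors; same return value.

-- ===== PORT A =====
-- _key_order(key): sorted(range(len(key)), key=lambda i: (key[i], i))  (helper shared by A and B, as in Python)
def keyOrder (key : String) : List Nat :=
  PySem.List.sorted2 (List.range key.toList.length)
    (fun i => key.toList.getD i ' ') (fun i => i) false

-- _cell_lengths: the inner `for _ in range(cols)` loop (recursion on the remaining count)
def cellRow (textLen : Nat) : Nat → Bool → Nat → List Nat × Nat
  | used, _, 0 => ([], used)
  | used, takeTwo, n + 1 =>
    if textLen ≤ used then ([], used)
    else
      let ln := min (if takeTwo then 2 else 1) (textLen - used)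
      let rest := cellRow textLen (used + ln) (!takeTwo) n
      (ln :: rest.1, rest.2)

-- _cell_lengths: the `while used < text_len` loop; fuel = textLen bounds the number of rows
-- (each row consumes ≥ 1 character when cols ≥ 1; with cols = 0 Python diverges, outside Pre_)
def cellLoop (textLen cols : Nat) : Nat → Bool → Nat → List (List Nat)
  | _, _, 0 => []
  | used, rowStartTwo, fuel + 1 =>
    if used < textLen then
      let rw := cellRow textLen used rowStartTwo cols
      rw.1 :: cellLoop textLen cols rw.2 (!rowStartTwo) fuel
    else []

def cellLengths (textLen cols : Nat) : List (List Nat) :=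
  cellLoop textLen cols 0 false textLen

-- A: fill a grid column by column in key order, then read it out row-major
def amsco_decrypt (ciphertext : String) (key : String) : String :=
  let text := ciphertext.toList
  let cols := key.toList.length
  let lengths := cellLengths text.length cols
  let grid0 : List (List (List Char)) := lengths.map (fun row => row.map (fun _ => []))
  let fills := (keyOrder key).foldl (fun (st : List (List (List Char)) × Nat) c =>
    (lengths.zipIdx).foldl (fun (st : List (List (List Char)) × Nat) rrow =>
      if c < rrow.1.length then
        (st.1.set rrow.2 ((st.1.getD rrow.2 []).set c ((text.drop st.2).take (rrow.1.getD c 0))),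
          st.2 + rrow.1.getD c 0)
      else st) st) (grid0, 0)
  let out := (lengths.zipIdx).foldl (fun (acc : List (List Char)) rrow =>
    (List.range rrow.1.length).foldl (fun acc c =>
      acc ++ [(fills.1.getD rrow.2 []).getD c []]) acc) []
  String.ofList out.flatten

-- ===== PORT B =====
-- B: per-column totals, carve start offsets in key order, row-major readout with cursors
def amsco_decrypt_alt (ciphertext : String) (key : String) : String :=
  let text := ciphertext.toList
  let cols := key.toList.length
  let lengths := cellLengths text.length cols
  let colTotal := lengths.foldl (fun tot row =>
    row.zipIdx.foldl (fun (tot : List Nat) cl =>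
      tot.set cl.2 (tot.getD cl.2 0 + cl.1)) tot) (List.replicate cols 0)
  let carve := (keyOrder key).foldl (fun (st : List Nat × Nat) c =>
    (st.1.set c st.2, st.2 + colTotal.getD c 0)) (List.replicate cols 0, 0)
  let readout := lengths.foldl (fun (st : List (List Char) × List Nat) row =>
    row.zipIdx.foldl (fun (st : List (List Char) × List Nat) cl =>
      (st.1 ++ [(text.drop (st.2.getD cl.2 0)).take cl.1],
       st.2.set cl.2 (st.2.getD cl.2 0 + cl.1))) st)
    ([], carve.1)
  String.ofList readout.1.flatten

-- ===== PRECONDITION & SPEC =====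
-- Pre_ excludes exactly the empty key, on which Python A raises ValueError (B raises the same).
def Pre_amsco_decrypt (ciphertext : String) (key : String) : Prop := key ≠ ""
instance (ciphertext : String) (key : String) : Decidable (Pre_amsco_decrypt ciphertext key) := by
  unfold Pre_amsco_decrypt; infer_instance

def pvWitness_amsco_decrypt : String × String := ("ABCDEFGHIJ", "3142")

def Spec_amsco_decrypt (ciphertext : String) (key : String) (out : String) : Prop := out = amsco_decrypt_alt ciphertext key
instance (ciphertext : String) (key : String) (out : String) : Decidable (Spec_amsco_decrypt ciphertext key out) := by unfold Spec_amsco_decrypt; infer_instance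

-- ===== CLAIM (what is proved, stated in full; the proofs are below) =====
def Claim_equal_amsco_decrypt : Prop := ∀ (ciphertext : String) (key : String), Dom_amsco_decrypt ciphertext key → Pre_amsco_decrypt ciphertext key → Spec_amsco_decrypt ciphertext key (amsco_decrypt ciphertext key)

-- ===== LEMMAS AND PROOFS =====

theorem getD_set_self {α : Type} (l : List α) (i : Nat) (x d : α) (h : i < l.length) :
    (l.set i x).getD i d = x := by
  simp [List.getD_eq_getElem?_getD, h]

theorem getD_set_ne {α : Type} (l : List α) (i j : Nat) (x d : α) (h : i ≠ j) :
    (l.set i x).getD j d = l.getD j d := by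
  simp [List.getD_eq_getElem?_getD, List.getElem?_set_ne h]

theorem getD_nil_of_ge {α : Type} (l : List α) (d : α) (r : Nat) (h : l.length ≤ r) :
    l.getD r d = d := by
  simp [List.getD_eq_getElem?_getD, List.getElem?_eq_none h]

theorem getD_replicate_zero (n c : Nat) : (List.replicate n (0:Nat)).getD c 0 = 0 := by
  rcases Nat.lt_or_ge c n with h | h
  · simp [List.getD_eq_getElem?_getD, h]
  · exact getD_nil_of_ge _ _ _ (by simpa using h)

-- A's inner fold over one column c: cellwise characterisation
theorem fillCol_gen (text : List Char) (c : Nat) :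
    ∀ (rows : List (List Nat)) (r0 : Nat) (grid : List (List (List Char))) (idx : Nat),
    (∀ k, k < rows.length → r0 + k < grid.length ∧
        (grid.getD (r0 + k) []).length = (rows.getD k []).length) →
    (let res := (rows.zipIdx r0).foldl (fun (st : List (List (List Char)) × Nat) rrow =>
      if c < rrow.1.length then
        (st.1.set rrow.2 ((st.1.getD rrow.2 []).set c ((text.drop st.2).take (rrow.1.getD c 0))),
          st.2 + rrow.1.getD c 0)
      else st) (grid, idx)
     res.2 = idx + (rows.map (fun row => row.getD c 0)).sum ∧
     res.1.length = grid.length ∧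
     (∀ r, (res.1.getD r []).length = (grid.getD r []).length) ∧
     (∀ r c', ¬ (r0 ≤ r ∧ r < r0 + rows.length ∧ c' = c) →
        (res.1.getD r []).getD c' [] = (grid.getD r []).getD c' []) ∧
     (∀ k, k < rows.length → c < (rows.getD k []).length →
        (res.1.getD (r0 + k) []).getD c [] =
          (text.drop (idx + ((rows.take k).map (fun row => row.getD c 0)).sum)).take
            ((rows.getD k []).getD c 0)) ∧
     (∀ k, k < rows.length → ¬ c < (rows.getD k []).length →
        (res.1.getD (r0 + k) []).getD c [] = (grid.getD (r0 + k) []).getD c [])) := by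
  intro rows
  induction rows with
  | nil => intro r0 grid idx hsh; simp
  | cons row rest ih =>
    intro r0 grid idx hsh
    simp only [List.zipIdx_cons, List.foldl_cons]
    by_cases hc : c < row.length
    · simp only [hc, if_pos]
      set piece : List Char := (text.drop idx).take (row.getD c 0) with hpiece
      set grid1 := grid.set r0 ((grid.getD r0 []).set c piece) with hgrid1
      have hr0 : r0 + 0 < grid.length ∧ (grid.getD (r0+0) []).length = ((row::rest).getD 0 []).length :=
        hsh 0 (by simp)
      have hr0lt : r0 < grid.length := by simpa using hr0.1
      have hrowlen : (grid.getD r0 []).length = row.length := by simpa using hr0.2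
      have hsh1 : ∀ k, k < rest.length → r0 + 1 + k < grid1.length ∧
          (grid1.getD (r0 + 1 + k) []).length = (rest.getD k []).length := by
        intro k hk
        have := hsh (k+1) (by simpa using Nat.succ_lt_succ hk)
        constructor
        · simpa [hgrid1] using (by omega : r0 + (k+1) < grid.length → r0+1+k < grid.length) this.1
        · rw [hgrid1, getD_set_ne _ _ _ _ _ (by omega)]
          have : (grid.getD (r0 + (k+1)) []).length = (rest.getD k []).length := by
            simpa using this.2
          simpa [Nat.add_assoc, Nat.add_comm 1 k] using this
      have ihres := ih (r0+1) grid1 (idx + row.getD c 0) hsh1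
      obtain ⟨h2, hlen, hrlen, huntouched, hset, hunset⟩ := ihres
      refine ⟨?_, ?_, ?_, ?_, ?_, ?_⟩
      · simpa [Nat.add_assoc] using h2
      · rw [hlen, hgrid1, List.length_set]
      · intro r
        rw [hrlen r]
        by_cases hr : r = r0
        · subst hr; rw [hgrid1, getD_set_self _ _ _ _ hr0lt]; simp
        · rw [hgrid1, getD_set_ne _ _ _ _ _ (by omega)]
      · intro r c' hcond
        rw [huntouched r c' (by simp at hcond ⊢; omega)]
        by_cases hr : r = r0
        · subst hr
          rw [hgrid1, getD_set_self _ _ _ _ hr0lt]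
          have hc'ne : c' ≠ c := by simp at hcond; omega
          rw [getD_set_ne _ _ _ _ _ (fun h => hc'ne h.symm)]
        · rw [hgrid1, getD_set_ne _ _ _ _ _ (by omega)]
      · intro k hk hck
        match k with
        | 0 =>
          rw [huntouched (r0+0) c (by omega)]
          simp only [Nat.add_zero]
          rw [hgrid1, getD_set_self _ _ _ _ hr0lt,
              getD_set_self _ _ _ _ (by rw [hrowlen]; simpa using hck)]
          simp [hpiece]
        | k+1 =>
          have := hset k (by simpa using Nat.lt_of_succ_lt_succ hk) (by simpa using hck)
          rw [(by omega : r0 + (k+1) = r0 + 1 + k), this]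
          simp [Nat.add_assoc]
      · intro k hk hck
        match k with
        | 0 => exact absurd hc (by simpa using hck)
        | k+1 =>
          rw [(by omega : r0 + (k+1) = r0 + 1 + k),
              hunset k (by simpa using Nat.lt_of_succ_lt_succ hk) (by simpa using hck)]
          rw [hgrid1, getD_set_ne _ _ _ _ _ (by omega)]
    · simp only [hc, if_false]
      have hrow0 : row[c]?.getD 0 = 0 := by
        simp [List.getElem?_eq_none (by omega : row.length ≤ c)]
      have hsh1 : ∀ k, k < rest.length → r0 + 1 + k < grid.length ∧
          (grid.getD (r0 + 1 + k) []).length = (rest.getD k []).length := by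
        intro k hk
        have h := hsh (k+1) (by simpa using Nat.succ_lt_succ hk)
        constructor
        · have := h.1; omega
        · rw [(show r0+1+k = r0+(k+1) by omega)]; simpa using h.2
      have ihres := ih (r0+1) grid idx hsh1
      obtain ⟨h2, hlen, hrlen, huntouched, hset, hunset⟩ := ihres
      refine ⟨?_, hlen, hrlen, ?_, ?_, ?_⟩
      · rw [h2]; simp [hrow0]
      · intro r c' hcond
        apply huntouched; simp at hcond ⊢; omega
      · intro k hk hck
        match k with
        | 0 => exact absurd (by simpa using hck) hc
        | k+1 =>
          have := hset k (by simpa using Nat.lt_of_succ_lt_succ hk) (by simpa using hck)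
          rw [(by omega : r0 + (k+1) = r0 + 1 + k), this]
          simp [hrow0]
      · intro k hk hck
        match k with
        | 0 =>
          have := huntouched (r0+0) c (by omega)
          simpa using this
        | k+1 =>
          rw [(by omega : r0 + (k+1) = r0 + 1 + k)]
          exact hunset k (by simpa using Nat.lt_of_succ_lt_succ hk) (by simpa using hck)

-- A's outer fold over the key order: every valid cell holds its slice of the ciphertext
theorem fillAll_gen (text : List Char) (lengths : List (List Nat)) :
    ∀ (os : List Nat) (grid : List (List (List Char))) (idx : Nat),
    os.Nodup →
    grid.length = lengths.length →
    (∀ r, (grid.getD r []).length = (lengths.getD r []).length) →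
    (let res := os.foldl (fun (st : List (List (List Char)) × Nat) c =>
      (lengths.zipIdx).foldl (fun (st : List (List (List Char)) × Nat) rrow =>
        if c < rrow.1.length then
          (st.1.set rrow.2 ((st.1.getD rrow.2 []).set c ((text.drop st.2).take (rrow.1.getD c 0))),
            st.2 + rrow.1.getD c 0)
          else st) st) (grid, idx)
     res.1.length = lengths.length ∧
     (∀ r, (res.1.getD r []).length = (lengths.getD r []).length) ∧
     (∀ r c', c' ∉ os → (res.1.getD r []).getD c' [] = (grid.getD r []).getD c' []) ∧
     (∀ r c', c' ∈ os → c' < (lengths.getD r []).length →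
        (res.1.getD r []).getD c' [] =
          (text.drop (idx
              + ((os.takeWhile (· ≠ c')).map (fun c'' => (lengths.map (fun row => row.getD c'' 0)).sum)).sum
              + ((lengths.take r).map (fun row => row.getD c' 0)).sum)).take
            ((lengths.getD r []).getD c' 0))) := by
  intro os
  induction os with
  | nil =>
    intro grid idx _ hlen hsh
    exact ⟨hlen, hsh, fun r c' _ => rfl, fun r c' h => absurd h (by simp)⟩
  | cons c os' ih =>
    intro grid idx hnd hlen hsh
    simp only [List.foldl_cons]
    have hshape : ∀ k, k < lengths.length → 0 + k < grid.length ∧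
        (grid.getD (0 + k) []).length = (lengths.getD k []).length := by
      intro k hk
      exact ⟨by omega, by simpa using hsh k⟩
    have hfc := fillCol_gen text c lengths 0 grid idx hshape
    obtain ⟨hidx1, hlen1, hrlen1, huntouched1, hset1, hunset1⟩ := hfc
    set st1 := (lengths.zipIdx).foldl (fun (st : List (List (List Char)) × Nat) rrow =>
      if c < rrow.1.length then
        (st.1.set rrow.2 ((st.1.getD rrow.2 []).set c ((text.drop st.2).take (rrow.1.getD c 0))),
          st.2 + rrow.1.getD c 0)
      else st) (grid, idx) with hst1
    have hnd' : os'.Nodup := hnd.of_cons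
    have hcnotin : c ∉ os' := by simp at hnd; exact hnd.1
    have hih := ih st1.1 st1.2 hnd' (by rw [hlen1, hlen]) (fun r => by rw [hrlen1 r, hsh r])
    simp only [Prod.mk.eta] at hih
    obtain ⟨hlen2, hrlen2, huntouched2, hset2⟩ := hih
    refine ⟨hlen2, hrlen2, ?_, ?_⟩
    · intro r c' hc'
      simp only [List.mem_cons, not_or] at hc'
      rw [huntouched2 r c' hc'.2, huntouched1 r c' (by intro h; exact hc'.1 h.2.2)]
    · intro r c' hc' hcr
      have hrlt : r < lengths.length := by
        by_contra hge
        rw [getD_nil_of_ge lengths [] r (by omega)] at hcr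
        simp at hcr
      rcases List.mem_cons.mp hc' with hceq | hcin
      · subst hceq
        rw [huntouched2 r c' hcnotin]
        have := hset1 r hrlt hcr
        rw [(by omega : 0 + r = r)] at this
        rw [this]
        have htw : (List.takeWhile (fun x => decide ¬ x = c') (c' :: os')) = [] := by
          simp
        simp only [ne_eq, htw]
        simp
      · have hne : c ≠ c' := fun h => hcnotin (h ▸ hcin)
        have := hset2 r c' hcin hcr
        rw [this, hidx1]
        have htw : (List.takeWhile (fun x => decide ¬ x = c') (c :: os'))
            = c :: List.takeWhile (fun x => decide ¬ x = c') os' := by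
          simp [hne]
        simp only [ne_eq, htw, List.map_cons, List.sum_cons]
        ring_nf

-- B: per-row cursor/total bookkeeping
theorem rowTot_gen :
    ∀ (row : List Nat) (k : Nat) (tot : List Nat), k + row.length ≤ tot.length →
    (let res := (row.zipIdx k).foldl (fun (tot : List Nat) cl =>
        tot.set cl.2 (tot.getD cl.2 0 + cl.1)) tot
     res.length = tot.length ∧
     (∀ c, c < k → res.getD c 0 = tot.getD c 0) ∧
     (∀ j, res.getD (k + j) 0 = tot.getD (k + j) 0 + row.getD j 0)) := by
  intro row
  induction row with
  | nil => intro k tot _; exact ⟨rfl, fun _ _ => rfl, fun j => by simp⟩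
  | cons x rest ih =>
    intro k tot hk
    simp only [List.zipIdx_cons, List.foldl_cons]
    have hklt : k < tot.length := by simp at hk; omega
    set tot1 := tot.set k (tot.getD k 0 + x) with htot1
    have hih := ih (k+1) tot1 (by simp [htot1]; simp at hk; omega)
    obtain ⟨hlen, hlo, hhi⟩ := hih
    refine ⟨by rw [hlen]; simp [htot1], ?_, ?_⟩
    · intro c hc
      rw [hlo c (by omega), htot1, getD_set_ne _ _ _ _ _ (by omega)]
    · intro j
      match j with
      | 0 =>
        rw [(by omega : k + 0 = k), hlo k (by omega), htot1, getD_set_self _ _ _ _ hklt]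
        simp
      | j+1 =>
        rw [(by omega : k + (j+1) = (k+1) + j), hhi j, htot1,
            getD_set_ne _ _ _ _ _ (by omega)]
        simp

-- B: the column totals the first pass computes
theorem colTot_gen :
    ∀ (rows : List (List Nat)) (tot : List Nat), (∀ row ∈ rows, row.length ≤ tot.length) →
    (let res := rows.foldl (fun tot row => (row.zipIdx).foldl (fun (tot : List Nat) cl =>
        tot.set cl.2 (tot.getD cl.2 0 + cl.1)) tot) tot
     res.length = tot.length ∧
     ∀ c, res.getD c 0 = tot.getD c 0 + (rows.map (fun row => row.getD c 0)).sum) := by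
  intro rows
  induction rows with
  | nil => intro tot _; exact ⟨rfl, fun c => by simp⟩
  | cons row rest ih =>
    intro tot hrows
    simp only [List.foldl_cons]
    have h1 := rowTot_gen row 0 tot (by simpa using hrows row (by simp))
    obtain ⟨hlen1, _, hval1⟩ := h1
    set tot1 := (row.zipIdx 0).foldl (fun (tot : List Nat) cl =>
        tot.set cl.2 (tot.getD cl.2 0 + cl.1)) tot with htot1
    have hih := ih tot1 (fun r hr => by rw [hlen1]; exact hrows r (by simp [hr]))
    obtain ⟨hlen2, hval2⟩ := hih
    refine ⟨by rw [hlen2, hlen1], ?_⟩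
    intro c
    rw [hval2 c]
    have := hval1 c
    rw [(by omega : 0 + c = c)] at this
    rw [this]
    simp [Nat.add_assoc]

-- B: the carve pass assigns each column its start offset in key order
theorem carve_gen (colTotal : List Nat) :
    ∀ (os : List Nat) (cur : List Nat) (pos : Nat), os.Nodup →
    (let res := os.foldl (fun (st : List Nat × Nat) c =>
        (st.1.set c st.2, st.2 + colTotal.getD c 0)) (cur, pos)
     res.1.length = cur.length ∧
     (∀ c, c ∉ os → res.1.getD c 0 = cur.getD c 0) ∧
     (∀ c, c ∈ os → c < cur.length → res.1.getD c 0 =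
        pos + ((os.takeWhile (· ≠ c)).map (fun c' => colTotal.getD c' 0)).sum)) := by
  intro os
  induction os with
  | nil => intro cur pos _; exact ⟨rfl, fun _ _ => rfl, fun c h => absurd h (by simp)⟩
  | cons c0 os' ih =>
    intro cur pos hnd
    simp only [List.foldl_cons]
    have hnd' : os'.Nodup := hnd.of_cons
    have hc0 : c0 ∉ os' := by simp at hnd; exact hnd.1
    set cur1 := cur.set c0 pos with hcur1
    have hih := ih cur1 (pos + colTotal.getD c0 0) hnd'
    obtain ⟨hlen, hout, hin⟩ := hih
    refine ⟨by rw [hlen, hcur1, List.length_set], ?_, ?_⟩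
    · intro c hc
      simp only [List.mem_cons, not_or] at hc
      rw [hout c hc.2, hcur1, getD_set_ne _ _ _ _ _ (fun h => hc.1 h.symm)]
    · intro c hc hclt
      rcases List.mem_cons.mp hc with hceq | hcin
      · subst hceq
        rw [hout c hc0, hcur1, getD_set_self _ _ _ _ hclt]
        simp
      · have hne : c0 ≠ c := fun h => hc0 (h ▸ hcin)
        rw [hin c hcin (by rw [hcur1, List.length_set]; exact hclt)]
        have htw : (List.takeWhile (fun x => decide ¬ x = c) (c0 :: os'))
            = c0 :: List.takeWhile (fun x => decide ¬ x = c) os' := by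
          simp [hne]
        simp only [ne_eq, htw, List.map_cons, List.sum_cons]
        omega

-- the common reference: the pieces emitted row-major, given per-column read positions f
def specRows (text : List Char) : (Nat → Nat) → List (List Nat) → List (List Char)
  | _, [] => []
  | f, row :: rest =>
      row.zipIdx.map (fun cl => (text.drop (f cl.2)).take cl.1)
        ++ specRows text (fun c => f c + row.getD c 0) rest

theorem specRows_congr (text : List Char) :
    ∀ (rows : List (List Nat)) (f g : Nat → Nat) (N : Nat),
    (∀ row ∈ rows, row.length ≤ N) → (∀ c, c < N → f c = g c) →
    specRows text f rows = specRows text g rows := by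
  intro rows
  induction rows with
  | nil => intro f g N _ _; rfl
  | cons row rest ih =>
    intro f g N hrows hfg
    simp only [specRows]
    congr 1
    · apply List.map_congr_left
      intro cl hcl
      have hmem := List.mem_zipIdx hcl
      have : cl.2 < row.length := by omega
      rw [hfg cl.2 (by have := hrows row (by simp); omega)]
    · exact ih _ _ N (fun r hr => hrows r (by simp [hr]))
        (fun c hc => by rw [hfg c hc])

theorem map_zipIdx_eq_map_range {α : Type} (row : List Nat) (h : Nat → Nat → α) :
    row.zipIdx.map (fun cl => h cl.1 cl.2)
      = (List.range row.length).map (fun c => h (row.getD c 0) c) := by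
  apply List.ext_getElem
  · simp
  · intro i h1 h2
    simp only [List.getElem_map, List.getElem_zipIdx, List.getElem_range]
    congr 1
    rw [List.getD_eq_getElem?_getD]
    simp [List.getElem?_eq_getElem (by simpa using h1)]
    omega

-- A's row-major readout of a grid whose cells hold their slices is the reference
theorem specRows_cells (text : List Char) :
    ∀ (rows : List (List Nat)) (f : Nat → Nat) (cell : Nat → Nat → List Char) (r0 : Nat),
    (∀ k c, k < rows.length → c < (rows.getD k []).length →
        cell (r0 + k) c = (text.drop (f c + ((rows.take k).map (fun row => row.getD c 0)).sum)).take
          ((rows.getD k []).getD c 0)) →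
    List.flatten ((rows.zipIdx r0).map (fun rrow =>
        (List.range rrow.1.length).map (fun c => cell rrow.2 c)))
      = specRows text f rows := by
  intro rows
  induction rows with
  | nil => intro f cell r0 _; rfl
  | cons row rest ih =>
    intro f cell r0 hcell
    simp only [List.zipIdx_cons, List.map_cons, List.flatten_cons, specRows]
    congr 1
    · rw [map_zipIdx_eq_map_range row (fun ln c => (text.drop (f c)).take ln)]
      apply List.map_congr_left
      intro c hc
      have hclt : c < row.length := by simpa using hc
      have := hcell 0 c (by simp) (by simpa using hclt)
      rw [(by omega : r0 + 0 = r0)] at this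
      rw [this]
      simp
    · apply ih
      intro k c hk hc
      have := hcell (k+1) c (by simpa using Nat.succ_lt_succ hk) (by simpa using hc)
      rw [(by omega : r0 + (k+1) = (r0 + 1) + k)] at this
      rw [this]
      simp [Nat.add_assoc]

-- B's cursor readout is the reference
theorem rowRead_gen (text : List Char) :
    ∀ (row : List Nat) (k : Nat) (parts : List (List Char)) (cur : List Nat),
    k + row.length ≤ cur.length →
    (let res := (row.zipIdx k).foldl (fun (st : List (List Char) × List Nat) cl =>
        (st.1 ++ [(text.drop (st.2.getD cl.2 0)).take cl.1],
         st.2.set cl.2 (st.2.getD cl.2 0 + cl.1))) (parts, cur)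
     res.1 = parts ++ (row.zipIdx k).map (fun cl => (text.drop (cur.getD cl.2 0)).take cl.1) ∧
     res.2.length = cur.length ∧
     (∀ c, c < k → res.2.getD c 0 = cur.getD c 0) ∧
     (∀ j, res.2.getD (k + j) 0 = cur.getD (k + j) 0 + row.getD j 0)) := by
  intro row
  induction row with
  | nil => intro k parts cur _; exact ⟨by simp, rfl, fun _ _ => rfl, fun j => by simp⟩
  | cons x rest ih =>
    intro k parts cur hk
    simp only [List.zipIdx_cons, List.foldl_cons, List.map_cons]
    have hklt : k < cur.length := by simp at hk; omega
    set cur1 := cur.set k (cur.getD k 0 + x) with hcur1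
    set parts1 := parts ++ [(text.drop (cur.getD k 0)).take x] with hparts1
    have hih := ih (k+1) parts1 cur1 (by rw [hcur1, List.length_set]; simp at hk; omega)
    obtain ⟨hp, hlen, hlo, hhi⟩ := hih
    refine ⟨?_, by rw [hlen, hcur1, List.length_set], ?_, ?_⟩
    · rw [hp, hparts1, List.append_assoc]
      rw [List.singleton_append]
      congr 1
      congr 1
      apply List.map_congr_left
      intro cl hcl
      have hmem := List.mem_zipIdx hcl
      have : cur1.getD cl.2 0 = cur.getD cl.2 0 := by
        rw [hcur1, getD_set_ne _ _ _ _ _ (by omega)]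
      rw [this]
    · intro c hc
      rw [hlo c (by omega), hcur1, getD_set_ne _ _ _ _ _ (by omega)]
    · intro j
      match j with
      | 0 =>
        rw [(by omega : k + 0 = k), hlo k (by omega), hcur1, getD_set_self _ _ _ _ hklt]
        simp
      | j+1 =>
        rw [(by omega : k + (j+1) = (k+1) + j), hhi j, hcur1,
            getD_set_ne _ _ _ _ _ (by omega)]
        simp

theorem readAll_gen (text : List Char) :
    ∀ (rows : List (List Nat)) (parts : List (List Char)) (cur : List Nat),
    (∀ row ∈ rows, row.length ≤ cur.length) →
    (let res := rows.foldl (fun (st : List (List Char) × List Nat) row =>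
        (row.zipIdx).foldl (fun (st : List (List Char) × List Nat) cl =>
          (st.1 ++ [(text.drop (st.2.getD cl.2 0)).take cl.1],
           st.2.set cl.2 (st.2.getD cl.2 0 + cl.1))) st) (parts, cur)
     res.1 = parts ++ specRows text (fun c => cur.getD c 0) rows ∧
     res.2.length = cur.length) := by
  intro rows
  induction rows with
  | nil => intro parts cur _; exact ⟨by simp [specRows], rfl⟩
  | cons row rest ih =>
    intro parts cur hrows
    simp only [List.foldl_cons]
    have h1 := rowRead_gen text row 0 parts cur (by simpa using hrows row (by simp))
    obtain ⟨hp1, hlen1, _, hval1⟩ := h1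
    set st1 := (row.zipIdx 0).foldl (fun (st : List (List Char) × List Nat) cl =>
        (st.1 ++ [(text.drop (st.2.getD cl.2 0)).take cl.1],
         st.2.set cl.2 (st.2.getD cl.2 0 + cl.1))) (parts, cur) with hst1
    have hih := ih st1.1 st1.2 (fun r hr => by rw [hlen1]; exact hrows r (by simp [hr]))
    simp only [Prod.mk.eta] at hih
    obtain ⟨hp2, hlen2⟩ := hih
    refine ⟨?_, by rw [hlen2, hlen1]⟩
    rw [hp2, hp1, List.append_assoc]
    simp only [specRows]
    congr 1
    congr 1
    have hfeq : (fun c => st1.2.getD c 0) = (fun c => cur.getD c 0 + row.getD c 0) := by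
      funext c
      have := hval1 c
      rw [(by omega : 0 + c = c)] at this
      exact this
    rw [hfeq]

-- helper-function facts
theorem cellRow_len (textLen : Nat) :
    ∀ (n : Nat) (used : Nat) (t : Bool), (cellRow textLen used t n).1.length ≤ n := by
  intro n
  induction n with
  | zero => intro used t; simp [cellRow]
  | succ n ih =>
    intro used t
    simp only [cellRow]
    split
    · simp
    · simpa using ih _ _

theorem cellLoop_rows (textLen cols : Nat) :
    ∀ (fuel used : Nat) (t : Bool) (row : List Nat),
      row ∈ cellLoop textLen cols used t fuel → row.length ≤ cols := by
  intro fuel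
  induction fuel with
  | zero => intro used t row h; simp [cellLoop] at h
  | succ fuel ih =>
    intro used t row h
    simp only [cellLoop] at h
    split at h
    · rcases List.mem_cons.mp h with he | hm
      · subst he; exact cellRow_len textLen cols used t
      · exact ih _ _ _ hm
    · simp at h

theorem cellLengths_rows (textLen cols : Nat) :
    ∀ row ∈ cellLengths textLen cols, row.length ≤ cols :=
  fun row h => cellLoop_rows textLen cols textLen 0 false row h

theorem keyOrder_perm (key : String) : (keyOrder key).Perm (List.range key.toList.length) :=
  PySem.List.sorted2_perm _ _ _ _

theorem keyOrder_nodup (key : String) : (keyOrder key).Nodup :=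
  ((keyOrder_perm key).nodup_iff).mpr (List.nodup_range)

theorem keyOrder_mem (key : String) (c : Nat) : c ∈ keyOrder key ↔ c < key.toList.length := by
  rw [(keyOrder_perm key).mem_iff, List.mem_range]

-- the assembled equivalence
theorem amsco_eq (ciphertext key : String) :
    amsco_decrypt ciphertext key = amsco_decrypt_alt ciphertext key := by
  simp only [amsco_decrypt, amsco_decrypt_alt]
  set text := ciphertext.toList with htext
  set cols := key.toList.length with hcols
  set lengths := cellLengths text.length cols with hlengths
  set os := keyOrder key with hos
  have hrows : ∀ row ∈ lengths, row.length ≤ cols := by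
    rw [hlengths]; exact cellLengths_rows _ _
  have hnd : os.Nodup := keyOrder_nodup key
  have hmem : ∀ c, c ∈ os ↔ c < cols := fun c => keyOrder_mem key c
  -- A side: characterise the filled grid
  set grid0 := lengths.map (fun row => row.map (fun _ => ([] : List Char))) with hgrid0
  have hg0len : grid0.length = lengths.length := by rw [hgrid0, List.length_map]
  have hg0row : ∀ r, (grid0.getD r []).length = (lengths.getD r []).length := by
    intro r
    rw [hgrid0]
    simp only [List.getD_eq_getElem?_getD, List.getElem?_map]
    cases hh : lengths[r]? <;> simp
  have hfill := fillAll_gen text lengths os grid0 0 hnd hg0len hg0row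
  obtain ⟨_, _, _, hfset⟩ := hfill
  set fills := os.foldl (fun (st : List (List (List Char)) × Nat) c =>
    (lengths.zipIdx).foldl (fun (st : List (List (List Char)) × Nat) rrow =>
      if c < rrow.1.length then
        (st.1.set rrow.2 ((st.1.getD rrow.2 []).set c ((text.drop st.2).take (rrow.1.getD c 0))),
          st.2 + rrow.1.getD c 0)
      else st) st) (grid0, 0) with hfills
  set startF : Nat → Nat := fun c =>
    ((os.takeWhile (· ≠ c)).map (fun c'' => (lengths.map (fun row => row.getD c'' 0)).sum)).sum
    with hstartF
  have hcell : ∀ k c, k < lengths.length → c < (lengths.getD k []).length →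
      (fills.1.getD k []).getD c [] =
        (text.drop (startF c + ((lengths.take k).map (fun row => row.getD c 0)).sum)).take
          ((lengths.getD k []).getD c 0) := by
    intro k c hk hc
    have hcin : c ∈ os := by
      apply (hmem c).mpr
      have hmemrow : lengths.getD k [] ∈ lengths := by
        rw [List.getD_eq_getElem?_getD, List.getElem?_eq_getElem hk]
        exact List.getElem_mem hk
      have := hrows _ hmemrow
      omega
    have := hfset k c hcin hc
    rw [this]
    rw [hstartF]
    simp
  -- rewrite A's readout into flatten-of-maps and then into the reference
  simp only [PySem.List.foldl_append_singleton_eq_map, PySem.List.foldl_append_eq_flatMap,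
    List.nil_append, List.flatMap_def]
  have hA : List.flatten ((lengths.zipIdx).map (fun rrow =>
      (List.range rrow.1.length).map (fun c => (fills.1.getD rrow.2 []).getD c []))) =
      specRows text startF lengths := by
    apply specRows_cells text lengths startF (fun r c => (fills.1.getD r []).getD c []) 0
    intro k c hk hc
    rw [(by omega : 0 + k = k)]
    exact hcell k c hk hc
  rw [hA]
  -- B side
  set colTotal := lengths.foldl (fun tot row =>
    row.zipIdx.foldl (fun (tot : List Nat) cl =>
      tot.set cl.2 (tot.getD cl.2 0 + cl.1)) tot) (List.replicate cols 0) with hcolTotal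
  have hct := colTot_gen lengths (List.replicate cols 0)
    (by intro row hr; rw [List.length_replicate]; exact hrows row hr)
  obtain ⟨hctlen, hctval⟩ := hct
  have hctval' : ∀ c, colTotal.getD c 0 = (lengths.map (fun row => row.getD c 0)).sum := by
    intro c
    rw [hcolTotal]
    rw [hctval c, getD_replicate_zero]
    omega
  set carve := os.foldl (fun (st : List Nat × Nat) c =>
    (st.1.set c st.2, st.2 + colTotal.getD c 0)) (List.replicate cols 0, 0) with hcarve
  have hcv := carve_gen colTotal os (List.replicate cols 0) 0 hnd
  obtain ⟨hcvlen, _, hcvval⟩ := hcv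
  have hcvlen' : carve.1.length = cols := by
    rw [hcarve] at *
    rw [hcvlen, List.length_replicate]
  have hread := readAll_gen text lengths [] carve.1
    (by intro row hr; rw [hcvlen']; exact hrows row hr)
  obtain ⟨hbparts, _⟩ := hread
  rw [hbparts, List.nil_append]
  -- the two reference readouts agree on all real columns
  have hagree : ∀ c, c < cols → carve.1.getD c 0 = startF c := by
    intro c hc
    have := hcvval c ((hmem c).mpr hc) (by rw [List.length_replicate]; exact hc)
    rw [hcarve] at *
    rw [this, Nat.zero_add, hstartF]
    simp only [ne_eq]
    congr 1
    apply List.map_congr_left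
    intro c' _
    exact hctval' c'
  rw [specRows_congr text lengths (fun c => carve.1.getD c 0) startF cols hrows hagree]

-- ===== VERDICT (by name: the statement is the Claim_ definition above) =====
theorem amsco_decrypt_spec : Claim_equal_amsco_decrypt := by
  intro ciphertext key _ _
  unfold Spec_amsco_decrypt
  exact amsco_eq ciphertext key
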